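-- pv_equiv track=rewrite | github.com/loganrubenstein-cmyk/florida-donor-tracker | scripts/62_load_lobbying_firms_supabase.py | tsv_row
-- ===== SOURCE A (Python) =====
-- def tsv_row(values):
--     parts = []
--     for v in values:
--         if v is None:
--             parts.append("")
--         else:
--             # Escape tabs and newlines for COPY TEXT format
--             parts.append(str(v).replace("\\", "\\\\").replace("\t", "\\t").replace("\n", "\\n"))
--     return "\t".join(parts) + "\n"
-- ===== SOURCE B (Python) =====
-- def tsv_row(values):
--     # Single streaming pass: emit separator + escaped characters into one buffer,
--     # no per-value replace chain and no join of parts.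
--     out = []
--     first = True
--     for v in values:
--         if first:
--             first = False
--         else:
--             out.append('\t')
--         if v is not None:
--             for ch in str(v):
--                 if ch == '\\':
--                     out.append('\\\\')
--                 elif ch == '\t':
--                     out.append('\\t')
--                 elif ch == '\n':
--                     out.append('\\n')
--                 else:
--                     out.append(ch)
--     out.append('\n')
--     return ''.join(out)
-- ===== Notes on version B (the rewrite author's own statement) =====
-- stated objective: alternative
-- what changed: A builds a list of per-value strings via three chained whole-string .replace() passes and then tab-joins; B is a single streaming character-level pass that emits separators and escaped characters into one buffer, with no replace and no join of parts.
import Mathlib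
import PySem

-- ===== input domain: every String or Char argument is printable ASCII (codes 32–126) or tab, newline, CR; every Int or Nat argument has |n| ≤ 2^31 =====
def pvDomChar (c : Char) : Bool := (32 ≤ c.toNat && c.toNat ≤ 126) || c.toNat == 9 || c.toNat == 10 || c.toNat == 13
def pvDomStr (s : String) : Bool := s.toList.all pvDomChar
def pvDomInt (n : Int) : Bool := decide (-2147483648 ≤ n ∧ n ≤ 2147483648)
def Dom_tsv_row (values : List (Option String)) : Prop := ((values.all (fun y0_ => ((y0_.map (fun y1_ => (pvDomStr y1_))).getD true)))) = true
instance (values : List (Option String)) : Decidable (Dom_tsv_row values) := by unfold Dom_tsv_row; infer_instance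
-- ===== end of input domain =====

-- B replaces A's per-value replace-chain + tab-join with one streaming character-level pass that emits separators and escaped characters into a single buffer: alternative decomposition, same cost.

-- ===== PORT A =====
-- A: accumulate escaped parts with a loop of three chained replaces, then join with tabs and append "\n".
def tsv_row (values : List (Option String)) : String :=
  let parts : List (List Char) := values.foldl (fun parts v =>
    match v with
    | none => parts ++ [[]]
    | some s => parts ++ [PySem.Chars.replace (PySem.Chars.replace (PySem.Chars.replace s.toList ['\\'] ['\\', '\\']) ['\t'] ['\\', 't']) ['\n'] ['\\', 'n']]) []
  String.ofList (PySem.Chars.join ['\t'] parts ++ ['\n'])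

-- ===== PORT B =====
-- B: a single fold over values carrying (buffer, first) state; each character is
-- dispatched by the if-chain and appended to the one buffer; '\n' appended at the end.
def tsv_row_alt (values : List (Option String)) : String :=
  let st : List Char × Bool := values.foldl (fun st v =>
    let out := if st.2 then st.1 else st.1 ++ ['\t']
    let out := match v with
      | none => out
      | some s => s.toList.foldl (fun out ch =>
          if ch = '\\' then out ++ ['\\', '\\']
          else if ch = '\t' then out ++ ['\\', 't']
          else if ch = '\n' then out ++ ['\\', 'n']
          else out ++ [ch]) out
    (out, false)) ([], true)
  String.ofList (st.1 ++ ['\n'])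

-- ===== PRECONDITION & SPEC =====
def Spec_tsv_row (values : List (Option String)) (out : String) : Prop := out = tsv_row_alt values
instance (values : List (Option String)) (out : String) : Decidable (Spec_tsv_row values out) := by unfold Spec_tsv_row; infer_instance

-- ===== CLAIM (what is proved, stated in full; the proofs are below) =====
def Claim_equal_tsv_row : Prop := ∀ (values : List (Option String)), Dom_tsv_row values → Spec_tsv_row values (tsv_row values)

-- ===== LEMMAS AND PROOFS =====

-- the per-character substitution both sides compute
def tsvEscChar (c : Char) : List Char :=
  if c = '\\' then ['\\', '\\']
  else if c = '\t' then ['\\', 't']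
  else if c = '\n' then ['\\', 'n']
  else [c]

def tsvEsc (v : Option String) : List Char :=
  match v with
  | none => []
  | some s => s.toList.flatMap tsvEscChar

-- single-character replace is a flatMap of a per-character substitution
theorem replace_go_single (a : Char) (new : List Char) :
    ∀ (l : List Char) (fuel : Nat) (acc : List Char), l.length ≤ fuel →
      PySem.Chars.replace.go [a] new fuel l acc
        = acc.reverse ++ l.flatMap (fun c => if c = a then new else [c]) := by
  intro l
  induction l with
  | nil =>
    intro fuel acc _
    cases fuel <;> simp [PySem.Chars.replace.go]
  | cons c t ih =>
    intro fuel acc hle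
    cases fuel with
    | zero => simp at hle
    | succ f =>
      have hle' : t.length ≤ f := by simpa using hle
      by_cases hca : c = a
      · subst hca
        have hpre : List.isPrefixOf [c] (c :: t) = true := by
          simp [List.isPrefixOf]
        rw [PySem.Chars.replace.go, if_pos hpre]
        simp only [List.length_cons, List.length_nil, List.drop_succ_cons, List.drop_zero]
        rw [ih f (new.reverse ++ acc) hle']
        simp
      · have hpre : List.isPrefixOf [a] (c :: t) = false := by
          simp [List.isPrefixOf]
          intro h; exact absurd h.symm hca
        rw [PySem.Chars.replace.go, if_neg (by simp [hpre])]
        rw [ih f (c :: acc) hle']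
        simp [hca]

theorem replace_single (a : Char) (new : List Char) (l : List Char) :
    PySem.Chars.replace l [a] new = l.flatMap (fun c => if c = a then new else [c]) := by
  rw [PySem.Chars.replace]
  simp only [List.isEmpty_cons, Bool.false_eq_true, if_false]
  exact replace_go_single a new l l.length [] le_rfl

-- A's three chained substitutions collapse to the per-character table
theorem chain_eq_esc (s : List Char) :
    PySem.Chars.replace (PySem.Chars.replace (PySem.Chars.replace s ['\\'] ['\\', '\\']) ['\t'] ['\\', 't']) ['\n'] ['\\', 'n']
      = s.flatMap tsvEscChar := by
  rw [replace_single, replace_single, replace_single, List.flatMap_assoc, List.flatMap_assoc]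
  apply List.flatMap_congr
  intro c _
  by_cases h1 : c = '\\'
  · subst h1; decide
  · by_cases h2 : c = '\t'
    · subst h2; decide
    · by_cases h3 : c = '\n'
      · subst h3; decide
      · simp [tsvEscChar, h1, h2, h3]

-- A's parts-accumulating foldl is a map of tsvEsc
theorem parts_foldl_eq_map (values : List (Option String)) (init : List (List Char)) :
    values.foldl (fun parts v =>
      match v with
      | none => parts ++ [[]]
      | some s => parts ++ [PySem.Chars.replace (PySem.Chars.replace (PySem.Chars.replace s.toList ['\\'] ['\\', '\\']) ['\t'] ['\\', 't']) ['\n'] ['\\', 'n']]) init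
    = init ++ values.map tsvEsc := by
  induction values generalizing init with
  | nil => simp
  | cons v t ih =>
    cases v with
    | none => simp [List.foldl_cons, ih, tsvEsc]
    | some s =>
      simp only [List.foldl_cons]
      rw [ih]
      simp [chain_eq_esc, tsvEsc]

-- B's inner per-character fold appends the flatMap of the table
theorem char_foldl_eq_flatMap (s : List Char) (out : List Char) :
    s.foldl (fun out ch =>
      if ch = '\\' then out ++ ['\\', '\\']
      else if ch = '\t' then out ++ ['\\', 't']
      else if ch = '\n' then out ++ ['\\', 'n']
      else out ++ [ch]) out = out ++ s.flatMap tsvEscChar := by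
  induction s generalizing out with
  | nil => simp
  | cons c t ih =>
    simp only [List.foldl_cons, ih, List.flatMap_cons]
    unfold tsvEscChar
    split_ifs <;> simp_all

-- B's outer fold, once past the first value, appends '\t' ++ esc for each value
theorem bfold_false (t : List (Option String)) (acc : List Char) :
    t.foldl (fun st v =>
      let out := if st.2 then st.1 else st.1 ++ ['\t']
      let out := match v with
        | none => out
        | some s => s.toList.foldl (fun out ch =>
            if ch = '\\' then out ++ ['\\', '\\']
            else if ch = '\t' then out ++ ['\\', 't']
            else if ch = '\n' then out ++ ['\\', 'n']
            else out ++ [ch]) out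
      (out, false)) (acc, false)
    = (acc ++ t.flatMap (fun v => '\t' :: tsvEsc v), false) := by
  induction t generalizing acc with
  | nil => simp
  | cons v t ih =>
    cases v with
    | none => simp [List.foldl_cons, ih, tsvEsc]
    | some s =>
      simp only [List.foldl_cons]
      rw [show (if (false : Bool) = true then acc else acc ++ ['\t']) = acc ++ ['\t'] by simp]
      rw [char_foldl_eq_flatMap, ih]
      simp [tsvEsc]

-- join with a one-character separator as a flatMap
theorem join_tab (l : List (List Char)) (x : List Char) :
    PySem.Chars.join ['\t'] (x :: l) = x ++ l.flatMap (fun y => '\t' :: y) := by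
  induction l generalizing x with
  | nil => simp [PySem.Chars.join_singleton]
  | cons y t ih =>
    rw [PySem.Chars.join_cons_cons, ih]
    simp

-- ===== VERDICT (by name: the statement is the Claim_ definition above) =====
theorem tsv_row_spec : Claim_equal_tsv_row := by
  intro values _
  unfold Spec_tsv_row tsv_row tsv_row_alt
  rw [parts_foldl_eq_map]
  cases values with
  | nil => simp [PySem.Chars.join_nil]
  | cons v t =>
    simp only [List.map_cons, List.nil_append, List.foldl_cons]
    rw [join_tab]
    cases v with
    | none =>
      show _ = String.ofList ((List.foldl _ (([] : List Char), false) t).1 ++ ['\n'])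
      rw [bfold_false]
      simp [tsvEsc, List.flatMap_map]
    | some s =>
      show _ = String.ofList ((List.foldl _
        (s.toList.foldl (fun out ch =>
          if ch = '\\' then out ++ ['\\', '\\']
          else if ch = '\t' then out ++ ['\\', 't']
          else if ch = '\n' then out ++ ['\\', 'n']
          else out ++ [ch]) ([] : List Char), false) t).1 ++ ['\n'])
      rw [char_foldl_eq_flatMap, bfold_false]
      simp [tsvEsc, List.flatMap_map]
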